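-- pv_equiv track=rewrite | github.com/DancingOnAir/LeetcodePythonSolution | string/1737_change_minimum_characters_to_satisfy_one_of_three_conditions.py | minCharacters
-- ===== SOURCE A (Python) =====
-- from collections import Counter
--
-- def minCharacters(a: str, b: str) -> int:
--     l1, l2 = len(a), len(b)
--
--     c1 = Counter(ord(c) - 97 for c in a)
--     c2 = Counter(ord(c) - 97 for c in b)
--
--     # condition 3
--     res = l1 + l2 - max((c1 + c2).values())
--     for i in range(25):
--         c1[i + 1] += c1[i]
--         c2[i + 1] += c2[i]
--         # condition 1
--         res = min(res, l1 - c1[i] + c2[i])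
--         # condition 2
--         res = min(res, l2 - c2[i] + c1[i])
--
--     return res
-- ===== SOURCE B (Python) =====
-- def minCharacters(a: str, b: str) -> int:
--     sa = sorted(ord(c) - 97 for c in a)
--     sb = sorted(ord(c) - 97 for c in b)
--     merged = sorted(sa + sb)
--     # condition 3: longest equal run in the sorted merge
--     best_run, run, prev = 0, 0, None
--     for x in merged:
--         run = run + 1 if x == prev else 1
--         prev = x
--         if run > best_run:
--             best_run = run
--     best = len(merged) - best_run
--     # conditions 1 and 2: two monotone pointers sweep the sorted code lists
--     i = j = 0
--     while i < len(sa) and sa[i] < 0: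
--         i += 1
--     while j < len(sb) and sb[j] < 0:
--         j += 1
--     i0, j0 = i, j
--     for t in range(1, 26):
--         while i < len(sa) and sa[i] < t:
--             i += 1
--         while j < len(sb) and sb[j] < t:
--             j += 1
--         la, lb = i - i0, j - j0
--         best = min(best, len(sa) - la + lb, len(sb) - lb + la)
--     return best
-- ===== Notes on version B (the rewrite author's own statement) =====
-- stated objective: alternative
-- what changed: Replaces A's Counter objects, Counter addition and incremental prefix accumulation with a sort-based algorithm: both code lists are sorted once, condition 3 is the longest equal run in the sorted merge, and the 25 split thresholds are swept with two monotone pointers over the sorted lists.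
import Mathlib
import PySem

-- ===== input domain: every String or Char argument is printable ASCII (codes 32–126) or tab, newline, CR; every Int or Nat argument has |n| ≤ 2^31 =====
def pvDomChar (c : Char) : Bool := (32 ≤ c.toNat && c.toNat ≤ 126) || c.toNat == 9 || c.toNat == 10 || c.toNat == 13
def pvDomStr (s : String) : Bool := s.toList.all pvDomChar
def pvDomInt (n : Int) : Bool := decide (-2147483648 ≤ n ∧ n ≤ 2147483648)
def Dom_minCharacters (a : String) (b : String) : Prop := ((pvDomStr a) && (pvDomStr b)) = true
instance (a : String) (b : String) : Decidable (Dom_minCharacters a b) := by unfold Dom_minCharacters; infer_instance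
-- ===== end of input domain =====

-- B sorts the code lists once, gets condition 3 as the longest equal run in the sorted merge, and sweeps
-- the 25 split thresholds with two monotone pointers — no Counter, no incremental prefix accumulation.
-- Objective: alternative (a genuinely different, sort-based algorithm; not claimed faster). Return values only; neither mutates.

-- ===== PORT A =====
-- ord(c) - 97 for c in s
def codes (s : String) : List Int := s.toList.map (fun c => ((c.toNat : Int) - 97))

-- hand port of Python's Counter.__add__ (c1 + c2): summed counts over c1's keys (kept if > 0),
-- then c2's keys not in c1 (kept if > 0); exact for int-valued Counters
def counterAdd (d1 d2 : PySem.Dict Int Int) : PySem.Dict Int Int :=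
  PySem.Dict.mk
    (((d1.items.map (fun p => (p.1, p.2 + d2.getD p.1 0))).filter (fun p => decide (0 < p.2)))
      ++ d2.items.filter (fun p => !d1.contains p.1 && decide (0 < p.2)))

-- loop body of A: c1[i+1] += c1[i]; c2[i+1] += c2[i]; res = min(res, …); res = min(res, …)
def stepA (l1 l2 : Int) (st : PySem.Dict Int Int × PySem.Dict Int Int × Int) (i : Int) :
    PySem.Dict Int Int × PySem.Dict Int Int × Int :=
  let c1 := st.1.insert (i + 1) (st.1.getD (i + 1) 0 + st.1.getD i 0)
  let c2 := st.2.1.insert (i + 1) (st.2.1.getD (i + 1) 0 + st.2.1.getD i 0)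
  (c1, c2, min (min st.2.2 (l1 - c1.getD i 0 + c2.getD i 0)) (l2 - c2.getD i 0 + c1.getD i 0))

-- max() on an empty values list raises ValueError in Python (a = b = ""): excluded by Pre_; .getD 0 is never the result there
def minCharacters (a : String) (b : String) : Int :=
  ((PySem.List.pyRange 0 25).foldl
      (stepA (PySem.Str.len a) (PySem.Str.len b))
      (PySem.Dict.counter (codes a), PySem.Dict.counter (codes b),
        PySem.Str.len a + PySem.Str.len b -
          (PySem.List.max? (counterAdd (PySem.Dict.counter (codes a)) (PySem.Dict.counter (codes b))).values
            (fun x => x)).getD 0)).2.2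

-- ===== PORT B =====
-- sorted(ord(c) - 97 for c in s)
def sortedCodes (s : String) : List Int := PySem.List.sorted (codes s) (fun x => x) false

-- loop body of B's run scan: run = run + 1 if x == prev else 1; prev = x; if run > best_run: best_run = run
def runStep (st : Int × Int × Option Int) (x : Int) : Int × Int × Option Int :=
  let run : Int := if (match st.2.2 with | some p => p == x | none => false) then st.2.1 + 1 else 1
  (if run > st.1 then run else st.1, run, some x)

-- while i < len(xs) and xs[i] < t: i += 1   (xs[i] at a valid nonneg index = getD i 0)
def advance (xs : List Int) (t : Int) (i : Nat) : Nat :=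
  if h : i < xs.length ∧ xs.getD i 0 < t then advance xs t (i + 1) else i
termination_by xs.length - i
decreasing_by omega

-- loop body of B's threshold sweep over t = 1..25
def stepT (sa sb : List Int) (i0 j0 : Nat) (st : Int × Nat × Nat) (t : Int) : Int × Nat × Nat :=
  let i := advance sa t st.2.1
  let j := advance sb t st.2.2
  (min (min st.1 ((sa.length : Int) - ((i - i0 : Nat) : Int) + ((j - j0 : Nat) : Int)))
       ((sb.length : Int) - ((j - j0 : Nat) : Int) + ((i - i0 : Nat) : Int)), i, j)

def minCharacters_alt (a : String) (b : String) : Int :=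
  let sa := sortedCodes a
  let sb := sortedCodes b
  let merged := PySem.List.sorted (sa ++ sb) (fun x => x) false
  let scan := merged.foldl runStep (0, 0, none)
  let best := (merged.length : Int) - scan.1
  let i0 := advance sa 0 0
  let j0 := advance sb 0 0
  ((PySem.List.pyRange 1 26).foldl (stepT sa sb i0 j0) (best, i0, j0)).1

-- ===== PRECONDITION & SPEC =====
-- Pre_ excludes only a = b = "", where A raises ValueError (max() of an empty sequence)
def Pre_minCharacters (a : String) (b : String) : Prop := ¬(a = "" ∧ b = "")
instance (a : String) (b : String) : Decidable (Pre_minCharacters a b) := by unfold Pre_minCharacters; infer_instance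
def pvWitness_minCharacters : String × String := ("ab", "c")

def Spec_minCharacters (a : String) (b : String) (out : Int) : Prop := out = minCharacters_alt a b
instance (a : String) (b : String) (out : Int) : Decidable (Spec_minCharacters a b out) := by unfold Spec_minCharacters; infer_instance

-- ===== CLAIM (what is proved, stated in full; the proofs are below) =====
def Claim_equal_minCharacters : Prop := ∀ (a : String) (b : String), Dom_minCharacters a b → Pre_minCharacters a b → Spec_minCharacters a b (minCharacters a b)

-- ===== LEMMAS AND PROOFS =====

-- count of k, as an Int
def cnt (L : List Int) (k : Int) : Int := (L.count k : Int)

-- prefix sum of the counts of codes 0 .. j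
def pref (L : List Int) (j : Nat) : Int := ((List.range (j + 1)).map (fun t : Nat => cnt L (t : Int))).sum

-- state of A's counters after the first m loop iterations
def InvA (L : List Int) (d : PySem.Dict Int Int) (m : Nat) : Prop :=
  ∀ j : Int, d.getD j 0 = if 0 ≤ j ∧ j ≤ (m : Int) then pref L j.toNat else cnt L j

-- common reference loop both ports reduce to
def refLoop (F : Int → Nat → Int) (m n : Nat) (r : Int) : Int :=
  match n with
  | 0 => r
  | Nat.succ n => refLoop F (m + 1) n (F r m)

-- shared per-threshold candidate
def Fref (l1 l2 : Int) (L1 L2 : List Int) (r : Int) (k : Nat) : Int :=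
  min (min r (l1 - pref L1 k + pref L2 k)) (l2 - pref L2 k + pref L1 k)

lemma pref_succ (L : List Int) (m : Nat) : pref L (m + 1) = pref L m + cnt L ((m : Int) + 1) := by
  simp [pref, List.range_succ]
  ring

lemma Inv_counter (L : List Int) : InvA L (PySem.Dict.counter L) 0 := by
  unfold InvA
  intro j
  rw [PySem.Dict.getD_counter]
  split_ifs with h
  · have hj : j = 0 := by omega
    subst hj
    simp [pref, cnt]
  · rfl

lemma getD_at_m (L : List Int) (d : PySem.Dict Int Int) (m : Nat) (h : InvA L d m) :
    d.getD (m : Int) 0 = pref L m := by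
  rw [h, if_pos ⟨by omega, by omega⟩]
  simp

lemma Inv_step (L : List Int) (d : PySem.Dict Int Int) (m : Nat) (h : InvA L d m) :
    InvA L (d.insert ((m : Int) + 1) (d.getD ((m : Int) + 1) 0 + d.getD (m : Int) 0)) (m + 1) := by
  intro j
  rw [PySem.Dict.getD_insert]
  by_cases hj : j = (m : Int) + 1
  · subst hj
    have h1 : d.getD ((m : Int) + 1) 0 = cnt L ((m : Int) + 1) := by
      rw [h, if_neg (by omega)]
    rw [if_pos rfl, h1, getD_at_m L d m h, if_pos ⟨by omega, by push_cast; omega⟩]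
    have ht : ((m : Int) + 1).toNat = m + 1 := by omega
    rw [ht, pref_succ]
    ring
  · rw [if_neg hj, h]
    split_ifs with h1 h2 h2
    · rfl
    · exfalso; push_cast at h2; omega
    · exfalso; push_cast at h1; omega
    · rfl

lemma loopA (l1 l2 : Int) (L1 L2 : List Int) :
    ∀ (n m : Nat) (d1 d2 : PySem.Dict Int Int) (r : Int), InvA L1 d1 m → InvA L2 d2 m →
      ((PySem.List.pyRange (m : Int) ((m : Int) + (n : Int))).foldl (stepA l1 l2) (d1, d2, r)).2.2
        = refLoop (Fref l1 l2 L1 L2) m n r := by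
  intro n
  induction n with
  | zero =>
    intro m d1 d2 r h1 h2
    simp [PySem.List.pyRange, refLoop]
  | succ n ih =>
    intro m d1 d2 r h1 h2
    rw [PySem.List.pyRange_one_cons (by push_cast; omega), List.foldl_cons]
    have hstep : stepA l1 l2 (d1, d2, r) (m : Int)
        = (d1.insert ((m : Int) + 1) (d1.getD ((m : Int) + 1) 0 + d1.getD (m : Int) 0),
           d2.insert ((m : Int) + 1) (d2.getD ((m : Int) + 1) 0 + d2.getD (m : Int) 0),
           Fref l1 l2 L1 L2 r m) := by
      simp only [stepA, Fref]
      rw [PySem.Dict.getD_insert, if_neg (by omega), getD_at_m L1 d1 m h1,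
          PySem.Dict.getD_insert, if_neg (by omega), getD_at_m L2 d2 m h2]
    rw [hstep]
    have harith : (m : Int) + ((n + 1 : Nat) : Int) = ((m + 1 : Nat) : Int) + (n : Int) := by
      push_cast; ring
    have hstart : (m : Int) + 1 = ((m + 1 : Nat) : Int) := by push_cast; ring
    rw [harith, hstart]
    have e1 := Inv_step L1 d1 m h1
    have e2 := Inv_step L2 d2 m h2
    rw [hstart] at e1 e2
    rw [ih (m + 1) _ _ _ e1 e2]
    rfl

-- specialization matching A's literal fold
lemma loopA_25 (l1 l2 : Int) (L1 L2 : List Int) (r : Int) :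
    ((PySem.List.pyRange 0 25).foldl (stepA l1 l2) (PySem.Dict.counter L1, PySem.Dict.counter L2, r)).2.2
      = refLoop (Fref l1 l2 L1 L2) 0 25 r := by
  have h := loopA l1 l2 L1 L2 25 0 (PySem.Dict.counter L1) (PySem.Dict.counter L2) r
    (Inv_counter L1) (Inv_counter L2)
  norm_num at h
  exact h

-- max over the multiplicities, Python's max((c1+c2).values()) with getD 0 for the empty case
def maxcnt (p : List Int) : Int :=
  (PySem.List.max? (p.map (fun k => ((p.count k : Int)))) (fun x => x)).getD 0

-- membership in the values of A's (c1 + c2)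
lemma mem_values_counterAdd (L1 L2 : List Int) (x : Int) :
    x ∈ (counterAdd (PySem.Dict.counter L1) (PySem.Dict.counter L2)).values
      ↔ ∃ k, k ∈ L1 ++ L2 ∧ x = ((L1 ++ L2).count k : Int) := by
  unfold counterAdd
  rw [PySem.Dict.values_mk, List.map_append, List.mem_append]
  constructor
  · intro hx
    rcases hx with hx | hx
    · rw [List.mem_map] at hx
      obtain ⟨p, hp, rfl⟩ := hx
      rw [List.mem_filter] at hp
      obtain ⟨hp1, _⟩ := hp
      rw [List.mem_map] at hp1
      obtain ⟨q, hq, rfl⟩ := hp1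
      rw [PySem.Dict.items_counter, List.mem_map] at hq
      obtain ⟨k, hk, rfl⟩ := hq
      rw [PySem.Set.mem_ofList] at hk
      refine ⟨k, List.mem_append_left _ hk, ?_⟩
      simp [PySem.Dict.getD_counter, List.count_append]
    · rw [List.mem_map] at hx
      obtain ⟨p, hp, rfl⟩ := hx
      rw [List.mem_filter] at hp
      obtain ⟨hp1, hp2⟩ := hp
      rw [PySem.Dict.items_counter, List.mem_map] at hp1
      obtain ⟨k, hk, rfl⟩ := hp1
      rw [PySem.Set.mem_ofList] at hk
      simp only [Bool.and_eq_true, Bool.not_eq_true', decide_eq_true_eq] at hp2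
      have hnot : k ∉ L1 := by
        intro hm
        have hc : L1.contains k = true := List.contains_iff_mem.2 hm
        rw [PySem.Dict.contains_counter] at hp2
        rw [hp2.1] at hc
        simp at hc
      refine ⟨k, List.mem_append_right _ hk, ?_⟩
      have hz : L1.count k = 0 := List.count_eq_zero.2 hnot
      simp [List.count_append, hz]
  · rintro ⟨k, hk, rfl⟩
    by_cases hk1 : k ∈ L1
    · left
      rw [List.mem_map]
      refine ⟨(k, (L1.count k : Int) + (PySem.Dict.counter L2).getD k 0), ?_, ?_⟩
      · rw [List.mem_filter]
        refine ⟨?_, ?_⟩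
        · rw [List.mem_map]
          refine ⟨(k, (L1.count k : Int)), ?_, rfl⟩
          rw [PySem.Dict.items_counter, List.mem_map]
          exact ⟨k, (PySem.Set.mem_ofList _ _).2 hk1, rfl⟩
        · simp only [PySem.Dict.getD_counter, decide_eq_true_eq]
          have h0 : 0 < L1.count k := List.count_pos_iff.2 hk1
          omega
      · simp [PySem.Dict.getD_counter, List.count_append]
    · right
      have hk2 : k ∈ L2 := by
        rcases List.mem_append.1 hk with h | h
        · exact absurd h hk1
        · exact h
      rw [List.mem_map]
      refine ⟨(k, (L2.count k : Int)), ?_, ?_⟩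
      · rw [List.mem_filter]
        refine ⟨?_, ?_⟩
        · rw [PySem.Dict.items_counter, List.mem_map]
          exact ⟨k, (PySem.Set.mem_ofList _ _).2 hk2, rfl⟩
        · simp only [PySem.Dict.contains_counter, Bool.and_eq_true, Bool.not_eq_true',
            decide_eq_true_eq]
          have h0 : 0 < L2.count k := List.count_pos_iff.2 hk2
          refine ⟨?_, by omega⟩
          rw [← Bool.not_eq_true, List.contains_iff_mem]
          exact hk1
      · have hz : L1.count k = 0 := List.count_eq_zero.2 hk1
        simp [List.count_append, hz]

lemma max?_id_congr (X Y : List Int) (h : ∀ x, x ∈ X ↔ x ∈ Y) :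
    PySem.List.max? X (fun x => x) = PySem.List.max? Y (fun x => x) := by
  cases hX : PySem.List.max? X (fun x => x) with
  | none =>
    rw [PySem.List.max?_eq_none_iff] at hX
    subst hX
    symm
    rw [PySem.List.max?_eq_none_iff]
    cases Y with
    | nil => rfl
    | cons y ys => exact absurd ((h y).2 (by simp)) (by simp)
  | some m =>
    have hmX : m ∈ X := PySem.List.max?_mem hX
    have hmY : m ∈ Y := (h m).1 hmX
    cases hY : PySem.List.max? Y (fun x => x) with
    | none =>
      rw [PySem.List.max?_eq_none_iff] at hY
      subst hY
      simp at hmY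
    | some m' =>
      have hm'Y : m' ∈ Y := PySem.List.max?_mem hY
      have h1 : m ≤ m' := PySem.List.max?_isMax hY m hmY
      have h2 : m' ≤ m := PySem.List.max?_isMax hX m' ((h m').2 hm'Y)
      rw [le_antisymm h1 h2]

-- A's initial value, written through maxcnt of the merged code list
lemma init_eq (a b : String) :
    PySem.Str.len a + PySem.Str.len b -
        (PySem.List.max? (counterAdd (PySem.Dict.counter (codes a)) (PySem.Dict.counter (codes b))).values
          (fun x => x)).getD 0
      = ((codes a ++ codes b).length : Int) - maxcnt (codes a ++ codes b) := by
  have hlen : PySem.Str.len a + PySem.Str.len b = ((codes a ++ codes b).length : Int) := by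
    simp [PySem.Str.len_eq, codes]
  have hmax : PySem.List.max? (counterAdd (PySem.Dict.counter (codes a)) (PySem.Dict.counter (codes b))).values (fun x => x)
      = PySem.List.max? ((codes a ++ codes b).map (fun k => ((codes a ++ codes b).count k : Int))) (fun x => x) := by
    apply max?_id_congr
    intro x
    rw [mem_values_counterAdd]
    simp only [List.mem_map]
    constructor
    · rintro ⟨k, hk, rfl⟩; exact ⟨k, hk, rfl⟩
    · rintro ⟨k, hk, rfl⟩; exact ⟨k, hk, rfl⟩
  rw [hlen, hmax, maxcnt]

-- ======= B-side lemmas =======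

lemma maxcnt_perm (M N : List Int) (h : M.Perm N) : maxcnt M = maxcnt N := by
  unfold maxcnt
  rw [max?_id_congr]
  intro x
  simp only [List.mem_map]
  constructor
  · rintro ⟨k, hk, rfl⟩; exact ⟨k, h.mem_iff.1 hk, by rw [h.count_eq]⟩
  · rintro ⟨k, hk, rfl⟩; exact ⟨k, h.mem_iff.2 hk, by rw [h.count_eq]⟩

lemma le_maxcnt (p : List Int) (v : Int) (hv : v ∈ p) : (p.count v : Int) ≤ maxcnt p := by
  unfold maxcnt
  cases hm : PySem.List.max? (p.map (fun k => ((p.count k : Int)))) (fun x => x) with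
  | none =>
    rw [PySem.List.max?_eq_none_iff, List.map_eq_nil_iff] at hm
    subst hm; simp at hv
  | some M =>
    simpa using PySem.List.max?_isMax hm _ (List.mem_map.2 ⟨v, hv, rfl⟩)

lemma maxcnt_append_singleton (p : List Int) (x : Int) :
    maxcnt (p ++ [x]) = max (maxcnt p) ((p.count x : Int) + 1) := by
  have hcx : (p ++ [x]).count x = p.count x + 1 := by
    simp [List.count_append]
  have hco : ∀ v, v ≠ x → (p ++ [x]).count v = p.count v := by
    intro v hv
    simp only [List.count_append, List.count_singleton]
    have : ¬x = v := fun h => hv h.symm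
    simp [this]
  apply le_antisymm
  · -- maxcnt (p ++ [x]) ≤ max …
    unfold maxcnt
    cases hm : PySem.List.max? ((p ++ [x]).map (fun k => (((p ++ [x]).count k : Int)))) (fun y => y) with
    | none =>
      rw [PySem.List.max?_eq_none_iff, List.map_eq_nil_iff] at hm
      simp at hm
    | some M =>
      have := PySem.List.max?_mem hm
      rw [List.mem_map] at this
      obtain ⟨v, hv, rfl⟩ := this
      simp only [Option.getD_some]
      by_cases hvx : v = x
      · subst hvx; rw [hcx]; push_cast; exact le_max_of_le_right (by omega)
      · have hvp : v ∈ p := by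
          rcases List.mem_append.1 hv with h | h
          · exact h
          · simp at h; exact absurd h hvx
        rw [hco v hvx]
        exact le_max_of_le_left (le_maxcnt p v hvp)
  · -- max … ≤ maxcnt (p ++ [x])
    apply max_le
    · -- maxcnt p ≤ maxcnt (p ++ [x])
      unfold maxcnt
      cases hm : PySem.List.max? (p.map (fun k => ((p.count k : Int)))) (fun y => y) with
      | none =>
        rw [PySem.List.max?_eq_none_iff, List.map_eq_nil_iff] at hm
        subst hm
        have : ((([] : List Int) ++ [x]).count x : Int) ≤ maxcnt ([] ++ [x]) :=
          le_maxcnt _ x (by simp)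
        simp only [List.nil_append] at this ⊢
        simp only [Option.getD_none]
        calc (0 : Int) ≤ ([x].count x : Int) := by positivity
          _ ≤ maxcnt [x] := this
      | some M =>
        have := PySem.List.max?_mem hm
        rw [List.mem_map] at this
        obtain ⟨v, hv, rfl⟩ := this
        simp only [Option.getD_some]
        calc (p.count v : Int) ≤ ((p ++ [x]).count v : Int) := by
              have : List.count v (p ++ [x]) = List.count v p + List.count v [x] :=
                List.count_append ..
              omega
          _ ≤ maxcnt (p ++ [x]) := le_maxcnt _ v (List.mem_append_left _ hv)
    · -- p.count x + 1 ≤ maxcnt (p ++ [x])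
      have := le_maxcnt (p ++ [x]) x (by simp)
      rw [hcx] at this
      push_cast at this
      exact this

lemma if_gt_eq_max (x y : Int) : (if y > x then y else x) = max x y := by
  rcases le_total x y with h | h
  · rcases eq_or_lt_of_le h with h | h
    · simp [h]
    · simp [h, max_eq_right h.le]
  · simp [not_lt.2 h, max_eq_left h]

-- invariant fold for the run scan over a sorted list
lemma run_aux : ∀ (xs q : List Int) (prev : Int),
    ((q ++ [prev]) ++ xs).Pairwise (· ≤ ·) →
    (xs.foldl runStep (maxcnt (q ++ [prev]), ((q ++ [prev]).count prev : Int), some prev)).1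
      = maxcnt ((q ++ [prev]) ++ xs) := by
  intro xs
  induction xs with
  | nil => intro q prev _; simp
  | cons x xs ih =>
    intro q prev hp
    have hps : ((q ++ [prev]) ++ [x] ++ xs).Pairwise (· ≤ ·) := by
      simpa [List.append_assoc] using hp
    have hsorted_p : (q ++ [prev]).Pairwise (· ≤ ·) :=
      hp.sublist (List.sublist_append_left _ _)
    have hle_prev : ∀ y ∈ q ++ [prev], y ≤ prev := by
      intro y hy
      rcases List.mem_append.1 hy with h | h
      · exact (List.pairwise_append.1 hsorted_p).2.2 y h prev (by simp)
      · simp at h; omega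
    have hcross : ∀ y ∈ q ++ [prev], y ≤ x := by
      intro y hy
      exact (List.pairwise_append.1 hp).2.2 y hy x (by simp)
    rw [List.foldl_cons]
    have hstep : runStep (maxcnt (q ++ [prev]), ((q ++ [prev]).count prev : Int), some prev) x
        = (maxcnt ((q ++ [prev]) ++ [x]), (((q ++ [prev]) ++ [x]).count x : Int), some x) := by
      unfold runStep
      by_cases hx : prev = x
      · subst hx
        simp only [BEq.rfl, if_true, Prod.mk.injEq]
        refine ⟨?_, ?_, trivial⟩
        · rw [if_gt_eq_max]
          conv_rhs => rw [maxcnt_append_singleton]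
        · have h1 : List.count prev ((q ++ [prev]) ++ [prev])
              = List.count prev (q ++ [prev]) + 1 := by
            rw [List.count_append]; simp
          rw [h1]; push_cast; ring
      · have hbeq : (prev == x) = false := by simp [hx]
        simp only [hbeq, Bool.false_eq_true, if_false, Prod.mk.injEq]
        have hnotmem : x ∉ q ++ [prev] := by
          intro hm
          exact hx (le_antisymm (hle_prev x hm) (hcross prev (by simp))).symm
        have hc0 : (q ++ [prev]).count x = 0 := List.count_eq_zero.2 hnotmem
        refine ⟨?_, ?_, trivial⟩
        · rw [if_gt_eq_max]
          conv_rhs => rw [maxcnt_append_singleton]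
          rw [hc0]
          norm_num
        · have h1 : List.count x ((q ++ [prev]) ++ [x]) = 1 := by
            rw [List.count_append, hc0]; simp
          rw [h1]; norm_num
    rw [hstep]
    have := ih (q ++ [prev]) x hps
    rw [List.append_assoc (q ++ [prev]) [x] xs] at this
    exact this

lemma runScan_eq (M : List Int) (hM : M.Pairwise (· ≤ ·)) :
    (M.foldl runStep ((0 : Int), (0 : Int), (none : Option Int))).1 = maxcnt M := by
  cases M with
  | nil => simp [maxcnt, PySem.List.max?]
  | cons x xs =>
    rw [List.foldl_cons]
    have hmx : maxcnt [x] = 1 := by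
      unfold maxcnt
      rw [show ([x].map fun k => ((List.count k [x] : Int))) = [(1 : Int)] by simp,
          PySem.List.max?_id_cons]
      rfl
    have hstep : runStep ((0 : Int), (0 : Int), (none : Option Int)) x
        = (maxcnt ([] ++ [x]), ((([] : List Int) ++ [x]).count x : Int), some x) := by
      unfold runStep
      simp only [List.nil_append, Prod.mk.injEq]
      refine ⟨?_, ?_, trivial⟩
      · rw [hmx]; norm_num
      · simp
    rw [hstep, run_aux xs [] x (by simpa using hM)]
    simp

-- takeWhile length = countP on a sorted list
lemma tw_countP (t : Int) : ∀ (xs : List Int), xs.Pairwise (· ≤ ·) →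
    (xs.takeWhile (fun x => decide (x < t))).length = xs.countP (fun x => decide (x < t)) := by
  intro xs
  induction xs with
  | nil => intro _; rfl
  | cons y ys ih =>
    intro h
    rw [List.pairwise_cons] at h
    by_cases hy : y < t
    · rw [List.takeWhile_cons_of_pos (by simpa using hy)]
      simp [hy, ih h.2]
    · rw [List.takeWhile_cons_of_neg (by simpa using hy)]
      symm
      rw [List.length_nil, List.countP_eq_zero]
      intro z hz
      simp only [decide_eq_true_eq]
      rcases List.mem_cons.1 hz with rfl | hz'
      · exact hy
      · have := h.1 z hz'
        omega

lemma advance_eq (xs : List Int) (t : Int) (hs : xs.Pairwise (· ≤ ·)) :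
    ∀ i, i ≤ xs.countP (fun x => decide (x < t)) →
      advance xs t i = xs.countP (fun x => decide (x < t)) := by
  have htw := tw_countP t xs hs
  set n := xs.countP (fun x => decide (x < t)) with hn
  have hnlen : n ≤ xs.length := by
    rw [hn]; exact List.countP_le_length
  have key : ∀ k i, i + k = n → advance xs t i = n := by
    intro k
    induction k with
    | zero =>
      intro i hi
      have hi' : i = n := by omega
      subst hi'
      rw [advance]
      rw [dif_neg]
      intro hcond
      have hl : n < xs.length := hcond.1
      -- element at position n is the head of the dropWhile part, which fails the predicate
      have hxs : xs.takeWhile (fun x => decide (x < t)) ++ xs.dropWhile (fun x => decide (x < t)) = xs :=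
        List.takeWhile_append_dropWhile
      have hdnil : xs.dropWhile (fun x => decide (x < t)) ≠ [] := by
        intro hdn
        rw [hdn, List.append_nil] at hxs
        have : xs.length = n := by rw [← hxs, htw]
        omega
      have hget : xs.getD n 0 = (xs.dropWhile (fun x => decide (x < t))).head hdnil := by
        conv_lhs => rw [← hxs]
        rw [List.getD_eq_getElem _ _ (by rw [hxs]; exact hl)]
        rw [List.getElem_append_right (by rw [htw])]
        rw [List.head_eq_getElem_zero hdnil]
        congr 1
        omega
      have hhead := List.head_dropWhile_not (fun x => decide (x < t)) hdnil
      rw [hget] at hcond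
      exact of_decide_eq_false hhead hcond.2
    | succ k ihk =>
      intro i hi
      have hil : i < n := by omega
      rw [advance]
      rw [dif_pos]
      · exact ihk (i + 1) (by omega)
      · constructor
        · omega
        · -- xs[i] is in the takeWhile prefix, so it satisfies (< t)
          have hpre : xs.takeWhile (fun x => decide (x < t)) <+: xs := List.takeWhile_prefix _
          have hitw : i < (xs.takeWhile (fun x => decide (x < t))).length := by rw [htw]; omega
          have hmem : (xs.takeWhile (fun x => decide (x < t)))[i] ∈ xs.takeWhile (fun x => decide (x < t)) :=
            List.getElem_mem _
          have hp := List.mem_takeWhile_imp hmem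
          simp only [decide_eq_true_eq] at hp
          have hge : xs.getD i 0 = (xs.takeWhile (fun x => decide (x < t)))[i] := by
            rw [List.getD_eq_getElem _ _ (by omega)]
            exact (List.IsPrefix.getElem hpre hitw).symm
          rw [hge]
          exact hp
  intro i hi
  exact key (n - i) i (by omega)

lemma countP_mono_lt (xs : List Int) (s t : Int) (h : s ≤ t) :
    xs.countP (fun x => decide (x < s)) ≤ xs.countP (fun x => decide (x < t)) := by
  apply List.countP_mono_left
  intro x _ hx
  simp only [decide_eq_true_eq] at hx ⊢
  omega

lemma countP_lt_succ (L : List Int) (m : Int) :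
    L.countP (fun x => decide (x < m + 1)) = L.countP (fun x => decide (x < m)) + L.count m := by
  induction L with
  | nil => rfl
  | cons y ys ih =>
    simp only [List.countP_cons, List.count_cons, ih, decide_eq_true_eq, beq_iff_eq]
    split_ifs <;> omega

lemma countP_pref (L : List Int) : ∀ (k : Nat),
    (L.countP (fun x => decide (x < (k : Int) + 1)) : Int)
      = (L.countP (fun x => decide (x < 0)) : Int) + pref L k := by
  intro k
  induction k with
  | zero =>
    have h := countP_lt_succ L 0
    norm_num at h ⊢
    rw [h]
    push_cast
    simp [pref, cnt]
  | succ k ih =>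
    have hc := countP_lt_succ L ((k : Int) + 1)
    have harith : ((k + 1 : Nat) : Int) + 1 = ((k : Int) + 1) + 1 := by push_cast; ring
    rw [harith, hc, pref_succ]
    push_cast
    push_cast at ih
    rw [ih]
    simp [cnt]
    ring

lemma pref_perm (X Y : List Int) (h : X.Perm Y) (m : Nat) : pref X m = pref Y m := by
  unfold pref cnt
  simp [h.count_eq]

-- B's threshold sweep equals the reference loop
lemma loopB (L1 L2 : List Int) (SA SB : List Int)
    (hpa : SA.Perm L1) (hpb : SB.Perm L2)
    (hsa : SA.Pairwise (· ≤ ·)) (hsb : SB.Pairwise (· ≤ ·)) :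
    ∀ (n m : Nat) (best : Int) (i j : Nat),
      i = SA.countP (fun x => decide (x < (m : Int))) →
      j = SB.countP (fun x => decide (x < (m : Int))) →
      ((PySem.List.pyRange ((m : Int) + 1) ((m : Int) + 1 + (n : Int))).foldl
          (stepT SA SB (SA.countP (fun x => decide (x < 0))) (SB.countP (fun x => decide (x < 0))))
          (best, i, j)).1
        = refLoop (Fref (L1.length : Int) (L2.length : Int) L1 L2) m n best := by
  intro n
  induction n with
  | zero =>
    intro m best i j _ _
    simp [PySem.List.pyRange, refLoop]
  | succ n ih =>
    intro m best i j hi hj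
    rw [PySem.List.pyRange_one_cons (by push_cast; omega), List.foldl_cons]
    have adv_i : advance SA ((m : Int) + 1) i = SA.countP (fun x => decide (x < (m : Int) + 1)) := by
      apply advance_eq SA _ hsa
      rw [hi]
      exact countP_mono_lt SA _ _ (by omega)
    have adv_j : advance SB ((m : Int) + 1) j = SB.countP (fun x => decide (x < (m : Int) + 1)) := by
      apply advance_eq SB _ hsb
      rw [hj]
      exact countP_mono_lt SB _ _ (by omega)
    have hdiff_a : ((advance SA ((m : Int) + 1) i - SA.countP (fun x => decide (x < 0)) : Nat) : Int)
        = pref L1 m := by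
      rw [adv_i]
      have hmono := countP_mono_lt SA 0 ((m : Int) + 1) (by omega)
      rw [Nat.cast_sub hmono]
      have hcp := countP_pref SA m
      rw [pref_perm SA L1 hpa m] at hcp
      omega
    have hdiff_b : ((advance SB ((m : Int) + 1) j - SB.countP (fun x => decide (x < 0)) : Nat) : Int)
        = pref L2 m := by
      rw [adv_j]
      have hmono := countP_mono_lt SB 0 ((m : Int) + 1) (by omega)
      rw [Nat.cast_sub hmono]
      have hcp := countP_pref SB m
      rw [pref_perm SB L2 hpb m] at hcp
      omega
    have hstep : stepT SA SB (SA.countP (fun x => decide (x < 0))) (SB.countP (fun x => decide (x < 0)))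
          (best, i, j) ((m : Int) + 1)
        = (Fref (L1.length : Int) (L2.length : Int) L1 L2 best m,
           SA.countP (fun x => decide (x < (m : Int) + 1)),
           SB.countP (fun x => decide (x < (m : Int) + 1))) := by
      simp only [stepT, Fref]
      rw [hdiff_a, hdiff_b, adv_i, adv_j, hpa.length_eq, hpb.length_eq]
    rw [hstep]
    have harith : (m : Int) + 1 + ((n + 1 : Nat) : Int) = ((m + 1 : Nat) : Int) + 1 + (n : Int) := by
      push_cast; ring
    have hstart : (m : Int) + 1 + 1 = ((m + 1 : Nat) : Int) + 1 := by push_cast; ring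
    have hcast : (m : Int) + 1 = ((m + 1 : Nat) : Int) := by push_cast; ring
    rw [harith, hstart, ih (m + 1) _ _ _ (by rw [← hcast]) (by rw [← hcast])]
    rfl

-- specialization matching B's literal fold (pyRange 1 26, pointers started by advance _ 0 0)
lemma loopB_26 (L1 L2 : List Int) (SA SB : List Int)
    (hpa : SA.Perm L1) (hpb : SB.Perm L2)
    (hsa : SA.Pairwise (· ≤ ·)) (hsb : SB.Pairwise (· ≤ ·)) (best : Int) :
    ((PySem.List.pyRange 1 26).foldl (stepT SA SB (advance SA 0 0) (advance SB 0 0))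
        (best, advance SA 0 0, advance SB 0 0)).1
      = refLoop (Fref (L1.length : Int) (L2.length : Int) L1 L2) 0 25 best := by
  have h0a : advance SA 0 0 = SA.countP (fun x => decide (x < 0)) :=
    advance_eq SA 0 hsa 0 (Nat.zero_le _)
  have h0b : advance SB 0 0 = SB.countP (fun x => decide (x < 0)) :=
    advance_eq SB 0 hsb 0 (Nat.zero_le _)
  have h := loopB L1 L2 SA SB hpa hpb hsa hsb 25 0 best
    (SA.countP (fun x => decide (x < 0))) (SB.countP (fun x => decide (x < 0)))
    (by norm_num) (by norm_num)
  norm_num at h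
  rw [h0a, h0b]
  exact h

-- ===== VERDICT (by name: the statement is the Claim_ definition above) =====
theorem minCharacters_spec : Claim_equal_minCharacters := by
  intro a b hdom hpre
  unfold Spec_minCharacters minCharacters minCharacters_alt
  rw [init_eq, loopA_25]
  simp only
  set SA := sortedCodes a with hSA
  set SB := sortedCodes b with hSB
  have hpa : SA.Perm (codes a) := PySem.List.sorted_perm _ _ _
  have hpb : SB.Perm (codes b) := PySem.List.sorted_perm _ _ _
  have hsa : SA.Pairwise (· ≤ ·) := by
    simpa using PySem.List.sorted_pairwise (codes a) (fun x => x)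
  have hsb : SB.Pairwise (· ≤ ·) := by
    simpa using PySem.List.sorted_pairwise (codes b) (fun x => x)
  have hMperm : (PySem.List.sorted (SA ++ SB) (fun x => x) false).Perm (codes a ++ codes b) :=
    (PySem.List.sorted_perm _ _ _).trans (hpa.append hpb)
  have hMsorted : (PySem.List.sorted (SA ++ SB) (fun x => x) false).Pairwise (· ≤ ·) := by
    simpa using PySem.List.sorted_pairwise (SA ++ SB) (fun x => x)
  rw [runScan_eq _ hMsorted, maxcnt_perm _ _ hMperm, hMperm.length_eq,
      loopB_26 (codes a) (codes b) SA SB hpa hpb hsa hsb]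
  rw [show PySem.Str.len a = ((codes a).length : Int) from by simp [PySem.Str.len_eq, codes],
      show PySem.Str.len b = ((codes b).length : Int) from by simp [PySem.Str.len_eq, codes]]
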